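-- pv_equiv track=rewrite | github.com/deekshaVarshney/ABSA-ESG | concepts/concept_parser_edited.py | conjugation_finder
-- ===== SOURCE A (Python) =====
-- def conjugation_finder(words, postags):
--   count_and = []
--   count_or = []
--   for i in range(0,len(words)):
--     if "and" in words and "CC" in postags[i]:
--       count_and = [n for (n, e) in enumerate(words) if e == 'and']
--
--   for i in range(0,len(words)):
--     if "or" in words and "CC" in postags[i]:
--       count_or = [n for (n, e) in enumerate(words) if e == 'or']
--
--   for i in count_and:
--     if "CC" in postags[i]:
--       pass
--     else:
--       count_and.remove(int(i))
--
--   for i in count_or: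
--     if "CC" in postags[i]:
--       pass
--     else:
--       count_or.remove(int(i))
--
--   count_conj = count_and + count_or
--   count_conj.sort()
--   return count_conj
-- ===== SOURCE B (Python) =====
-- def conjugation_finder(words, postags):
--     return [i for i, w in enumerate(words)
--             if w in ("and", "or") and "CC" in postags[i]]
-- ===== Notes on version B (the rewrite author's own statement) =====
-- stated objective: faster
-- what changed: Replaces A's repeated whole-list comprehensions, in-loop remove calls and final sort by one comprehension over enumerate(words) that collects conjunction indices whose tag contains 'CC', already in order.
-- intended difference: On inputs where some of the first len(words) postags contains 'CC' and two consecutive occurrences of the same conjunction word ('and' or 'or') are both tagged without 'CC', A's remove-during-iteration loop skips the element after a removed one and keeps that untagged index; B returns only conjunction indices whose tag contains 'CC', which is the function's purpose. — e.g. on conjugation_finder(["and", "and", "ran"], ["DT", "DT", "CC"]): A returns [1], B returns []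
import Mathlib
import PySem

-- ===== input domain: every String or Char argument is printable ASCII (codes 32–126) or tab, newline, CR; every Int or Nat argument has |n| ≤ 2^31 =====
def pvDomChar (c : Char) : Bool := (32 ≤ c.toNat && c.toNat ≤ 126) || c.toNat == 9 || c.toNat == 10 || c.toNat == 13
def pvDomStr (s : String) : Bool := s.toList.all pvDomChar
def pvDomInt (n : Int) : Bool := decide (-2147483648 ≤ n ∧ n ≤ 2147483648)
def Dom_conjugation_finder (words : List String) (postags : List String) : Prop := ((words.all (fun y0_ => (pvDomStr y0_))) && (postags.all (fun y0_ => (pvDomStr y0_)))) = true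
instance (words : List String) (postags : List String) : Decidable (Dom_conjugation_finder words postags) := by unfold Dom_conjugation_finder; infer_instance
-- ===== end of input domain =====

-- B is one pass over enumerate(words) collecting conjunction indices whose tag
-- contains "CC" (objective: faster); on the inputs of D_ below A's
-- remove-during-iteration loop keeps untagged indices and B intentionally differs.

-- ===== PORT A =====

-- "CC" in postags[i]; total via a default, exact under Pre_ (inside Pre_ every index used is in range)
def pvCC (postags : List String) (i : Int) : Bool :=
  PySem.Str.isIn "CC" (PySem.List.pyGetD postags i "")

-- [n for (n, e) in enumerate(words) if e == w]
def pvIdxsOf (ps : List (Int × String)) (w : String) : List Int :=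
  (ps.filter (fun p => p.2 == w)).map (fun p => p.1)

-- 'for i in lst: if "CC" in postags[i]: pass else: lst.remove(int(i))' — Python's
-- list iterator by position over the list it mutates; remove(x) with x = lst[p]
-- always succeeds and removes the first occurrence, i.e. List.erase.
def pvFilterLoop (postags : List String) (lst : List Int) (p : Nat) : List Int :=
  match h : lst[p]? with
  | none => lst
  | some x =>
    if pvCC postags x then pvFilterLoop postags lst (p + 1)
    else pvFilterLoop postags (lst.erase x) (p + 1)
termination_by lst.length - p
decreasing_by
  all_goals have hp := (List.getElem?_eq_some_iff.mp h).1
  · omega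
  · have h1 := List.length_erase_of_mem (List.mem_of_getElem? h)
    omega

def conjugation_finder (words : List String) (postags : List String) : List Int :=
  let count_and : List Int :=
    (PySem.List.pyRange 0 (words.length : Int) 1).foldl
      (fun acc i => if words.contains "and" && pvCC postags i
                    then pvIdxsOf (PySem.List.enumerate words) "and" else acc) []
  let count_or : List Int :=
    (PySem.List.pyRange 0 (words.length : Int) 1).foldl
      (fun acc i => if words.contains "or" && pvCC postags i
                    then pvIdxsOf (PySem.List.enumerate words) "or" else acc) []
  let count_and2 := pvFilterLoop postags count_and 0
  let count_or2 := pvFilterLoop postags count_or 0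
  PySem.List.sorted (count_and2 ++ count_or2) (fun x => x) false

-- ===== PORT B =====

-- Source B's comprehension: [i for i, w in enumerate(words) if w in ("and","or") and "CC" in postags[i]]
def conjugation_finder_alt (words : List String) (postags : List String) : List Int :=
  ((PySem.List.enumerate words).filter
      (fun p => (p.2 == "and" || p.2 == "or") && pvCC postags p.1)).map (fun p => p.1)

-- ===== PRECONDITION & SPEC =====
-- A indexes postags[i] for every i < len(words) as soon as 'and' or 'or' occurs in
-- words, so it raises IndexError when a conjunction is present and postags is
-- shorter than words; exactly those inputs are excluded.
def Pre_conjugation_finder (words : List String) (postags : List String) : Prop :=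
  ("and" ∈ words ∨ "or" ∈ words) → words.length ≤ postags.length
instance (words : List String) (postags : List String) : Decidable (Pre_conjugation_finder words postags) := by unfold Pre_conjugation_finder; infer_instance

def pvWitness_conjugation_finder : List String × List String :=
  (["cats", "and", "dogs"], ["NNS", "CC", "NNS"])

-- adjacent pair of occurrence indices both tagged without "CC"
def pvAdjBad (postags : List String) : List Int → Bool
  | a :: b :: r => (!pvCC postags a && !pvCC postags b) || pvAdjBad postags (b :: r)
  | _ => false

-- the positions (counting from k) at which the word w occurs
def pvConjOccs (words : List String) (w : String) (k : Int) : List Int :=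
  match words with
  | [] => []
  | x :: r => if x = w then k :: pvConjOccs r w (k + 1) else pvConjOccs r w (k + 1)

-- On inputs where some of the first len(words) postags contains "CC" and two
-- consecutive occurrences of the same conjunction word are both tagged without
-- "CC", A's remove-during-iteration loop skips the element after a removed one and
-- keeps that untagged index; B returns only conjunction indices whose tag contains
-- "CC", which is the function's purpose.
def D_conjugation_finder (words : List String) (postags : List String) : Prop :=
  ((List.range words.length).any (fun i => pvCC postags (i : Int))
    && (pvAdjBad postags (pvConjOccs words "and" 0)
        || pvAdjBad postags (pvConjOccs words "or" 0))) = true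
instance (words : List String) (postags : List String) : Decidable (D_conjugation_finder words postags) := by unfold D_conjugation_finder; infer_instance

def Spec_conjugation_finder (words : List String) (postags : List String) (out : List Int) : Prop := ¬ D_conjugation_finder words postags → out = conjugation_finder_alt words postags
instance (words : List String) (postags : List String) (out : List Int) : Decidable (Spec_conjugation_finder words postags out) := by unfold Spec_conjugation_finder; infer_instance

def pvDiffWitness_conjugation_finder : List String × List String :=
  (["and", "and", "ran"], ["DT", "DT", "CC"])
def pvDiffWitnessOut_conjugation_finder : (List Int) × (List Int) := ([1], [])

-- ===== CLAIM (what is proved, stated in full; the proofs are below) =====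
def Claim_unchanged_conjugation_finder : Prop := ∀ (words : List String) (postags : List String), Dom_conjugation_finder words postags → Pre_conjugation_finder words postags → Spec_conjugation_finder words postags (conjugation_finder words postags)
def Claim_changed_conjugation_finder : Prop := Dom_conjugation_finder (pvDiffWitness_conjugation_finder.1) (pvDiffWitness_conjugation_finder.2) ∧ Pre_conjugation_finder (pvDiffWitness_conjugation_finder.1) (pvDiffWitness_conjugation_finder.2) ∧ D_conjugation_finder (pvDiffWitness_conjugation_finder.1) (pvDiffWitness_conjugation_finder.2) ∧ conjugation_finder (pvDiffWitness_conjugation_finder.1) (pvDiffWitness_conjugation_finder.2) = pvDiffWitnessOut_conjugation_finder.1 ∧ conjugation_finder_alt (pvDiffWitness_conjugation_finder.1) (pvDiffWitness_conjugation_finder.2) = pvDiffWitnessOut_conjugation_finder.2 ∧ pvDiffWitnessOut_conjugation_finder.1 ≠ pvDiffWitnessOut_conjugation_finder.2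
def Claim_exact_conjugation_finder : Prop := ∀ (words : List String) (postags : List String), Dom_conjugation_finder words postags → Pre_conjugation_finder words postags → D_conjugation_finder words postags → conjugation_finder words postags ≠ conjugation_finder_alt words postags
-- ===== LEMMAS AND PROOFS =====

-- the remove-during-iteration filter, rephrased as a one-skip-ahead machine
def pvGo (postags : List String) : List Int → Bool → List Int
  | [], _ => []
  | x :: r, skip =>
    if skip then x :: pvGo postags r false
    else if pvCC postags x then x :: pvGo postags r false
    else pvGo postags r true

-- A's gate folds: the accumulator is reset to the same constant whenever the condition fires
theorem pv_foldl_gate (c : Bool) (f : Int → Bool) (l : List Int) (res init : List Int) :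
    l.foldl (fun acc i => if c && f i then res else acc) init
      = if c && l.any f then res else init := by
  induction l generalizing init with
  | nil => simp
  | cons a l ih =>
    simp only [List.foldl_cons, List.any_cons, ih]
    by_cases hc : c = true <;> by_cases ha : f a = true <;> simp [hc, ha]

theorem pvIdxsOf_nil_of_not_mem (words : List String) (w : String) (h : w ∉ words) :
    pvIdxsOf (PySem.List.enumerate words) w = [] := by
  unfold pvIdxsOf
  rw [List.map_eq_nil_iff, List.filter_eq_nil_iff]
  intro p hp hbeq
  refine h ?_
  have : p.2 ∈ (PySem.List.enumerate words).map (fun q => q.2) := List.mem_map_of_mem hp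
  rw [PySem.List.map_snd_enumerate] at this
  rwa [← (by exact (beq_iff_eq).mp hbeq : p.2 = w)]

theorem pv_enumerate_fst_pairwise (words : List String) :
    (PySem.List.enumerate words).Pairwise (fun a b => a.1 < b.1) := by
  have h := PySem.List.pairwise_lt_pyRange_one (a := 0) (b := (0 + words.length : Int))
  rw [← PySem.List.map_fst_enumerate] at h
  exact (List.pairwise_map).mp h

theorem pvIdxsOf_pairwise (words : List String) (w : String) :
    (pvIdxsOf (PySem.List.enumerate words) w).Pairwise (· < ·) := by
  unfold pvIdxsOf
  exact (List.pairwise_map).mpr ((pv_enumerate_fst_pairwise words).filter _)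

theorem pv_any_bridge (words postags : List String) :
    ((PySem.List.pyRange 0 (words.length : Int) 1).any (fun i => pvCC postags i))
      = (List.range words.length).any (fun i => pvCC postags (i : Int)) := by
  rw [PySem.List.pyRange_one, List.any_map]
  have h : ((words.length : Int) - 0).toNat = words.length := by omega
  rw [h]
  simp only [Function.comp_def]
  simp

theorem pv_occs_bridge (w : String) :
    ∀ (words : List String) (s : Int),
      pvIdxsOf (PySem.List.enumerate words s) w = pvConjOccs words w s := by
  intro words
  induction words with
  | nil => intro s; rfl
  | cons x r ih =>
    intro s
    have he : PySem.List.enumerate (x :: r) s = (s, x) :: PySem.List.enumerate r (s + 1) := by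
      simp [PySem.List.enumerate]
    rw [he]
    by_cases hx : x = w
    · simp [pvIdxsOf, pvConjOccs, hx] at ih ⊢
      exact ih (s + 1)
    · simp [pvIdxsOf, pvConjOccs, hx] at ih ⊢
      exact ih (s + 1)

theorem pvGo_skip_eq (postags : List String) (r : List Int) :
    pvGo postags r true = r.take 1 ++ pvGo postags (r.drop 1) false := by
  cases r <;> simp [pvGo]

theorem pv_erase_dec (lst : List Int) (x : Int) (p : Nat) (hp : p < lst.length) :
    (lst.erase x).length - (p + 1) < lst.length - p := by
  have h1 := List.length_erase_le (a := x) (l := lst)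
  omega

theorem pvFilterLoop_eq_go (postags : List String) (lst : List Int) (p : Nat)
    (hn : lst.Nodup) :
    pvFilterLoop postags lst p = lst.take p ++ pvGo postags (lst.drop p) false := by
  unfold pvFilterLoop
  split
  · next h =>
    have hp : lst.length ≤ p := by
      by_contra hlt
      exact absurd h (by simp [List.getElem?_eq_getElem (by omega : p < lst.length)])
    simp [List.take_of_length_le hp, List.drop_of_length_le hp, pvGo]
  · next x h =>
    have hp : p < lst.length := (List.getElem?_eq_some_iff.mp h).1
    have hx : lst[p] = x := (List.getElem?_eq_some_iff.mp h).2
    have hdrop : lst.drop p = x :: lst.drop (p + 1) := by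
      rw [List.drop_eq_getElem_cons hp, hx]
    split
    · next hcc =>
      rw [pvFilterLoop_eq_go postags lst (p + 1) hn]
      rw [hdrop, List.take_add_one, List.getElem?_eq_getElem hp, hx]
      simp [pvGo, hcc]
    · next hcc =>
      have hxmem : x ∈ lst := List.mem_of_getElem? h
      have hnottake : x ∉ lst.take p := by
        intro hxm
        obtain ⟨q, hq, hq2⟩ := List.getElem_of_mem hxm
        have hqlt : q < p := by
          have h' := hq
          simp only [List.length_take] at h'
          omega
        have : lst[q]'(by omega) = x := by
          rw [← hq2]; exact List.getElem_take.symm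
        have hne : q ≠ p := by omega
        exact hne (hn.getElem_inj_iff.mp (this.trans hx.symm))
      have hsplit : lst = lst.take p ++ x :: lst.drop (p + 1) := by
        conv_lhs => rw [← List.take_append_drop p lst]
        rw [hdrop]
      have herase : lst.erase x = lst.take p ++ lst.drop (p + 1) := by
        conv_lhs => rw [hsplit]
        rw [List.erase_append_right _ hnottake, List.erase_cons_head]
      have hlen : (lst.take p).length = p := List.length_take_of_le (by omega)
      rw [pvFilterLoop_eq_go postags (lst.erase x) (p + 1) (hn.erase x)]
      rw [herase, hdrop]
      have htake : (lst.take p ++ lst.drop (p + 1)).take (p + 1)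
          = lst.take p ++ (lst.drop (p + 1)).take 1 := by
        rw [List.take_append]
        simp [List.length_take, Nat.min_eq_left (le_of_lt hp), List.take_take]
      have hdrop2 : (lst.take p ++ lst.drop (p + 1)).drop (p + 1)
          = (lst.drop (p + 1)).drop 1 := by
        rw [List.drop_append]
        simp [List.length_take, Nat.min_eq_left (le_of_lt hp), List.drop_eq_nil_iff]
      rw [htake, hdrop2, List.append_assoc]
      simp [pvGo, hcc, pvGo_skip_eq]
termination_by lst.length - p
decreasing_by
  all_goals first
    | omega
    | exact pv_erase_dec lst _ p hp

theorem pvFilterLoop_nil (postags : List String) (p : Nat) :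
    pvFilterLoop postags [] p = [] := by
  unfold pvFilterLoop
  simp

-- without an adjacent untagged pair the skip machine is a plain filter
theorem pvGo_eq_filter (postags : List String) :
    ∀ (n : Nat) (L : List Int), L.length ≤ n → pvAdjBad postags L = false →
      pvGo postags L false = L.filter (fun x => pvCC postags x) := by
  intro n
  induction n with
  | zero =>
    intro L hlen _
    have : L = [] := List.eq_nil_of_length_eq_zero (by omega)
    subst this; rfl
  | succ n ih =>
    intro L hlen h
    match L with
    | [] => rfl
    | [x] => by_cases hx : pvCC postags x <;> simp [pvGo, hx]
    | x :: y :: t =>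
      by_cases hx : pvCC postags x
      · have h2 : pvAdjBad postags (y :: t) = false := by
          simp only [pvAdjBad, Bool.or_eq_false_iff] at h
          exact h.2
        have hlen2 : (y :: t).length ≤ n := by simp at hlen ⊢; omega
        have hgo : pvGo postags (x :: y :: t) false = x :: pvGo postags (y :: t) false := by
          simp [pvGo, hx]
        rw [hgo, ih (y :: t) hlen2 h2]
        simp [hx]
      · have hy : pvCC postags y = true := by
          simp only [pvAdjBad, Bool.or_eq_false_iff, Bool.and_eq_false_iff] at h
          rcases h.1 with h1 | h1
          · simp [hx] at h1
          · simpa using h1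
        have ht : pvAdjBad postags t = false := by
          simp only [pvAdjBad, Bool.or_eq_false_iff] at h
          have := h.2
          cases t with
          | nil => rfl
          | cons c u =>
            simp only [pvAdjBad, Bool.or_eq_false_iff, Bool.and_eq_false_iff] at this ⊢
            exact this.2
        have hlent : t.length ≤ n := by simp at hlen; omega
        simp [pvGo, hx, hy, ih t hlent ht]

-- the skip machine never returns fewer elements than the plain filter
theorem pvGo_len_ge (postags : List String) :
    ∀ (L : List Int) (sa : Bool),
      (L.filter (fun x => pvCC postags x)).length ≤ (pvGo postags L sa).length := by
  intro L
  induction L with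
  | nil => intro sa; simp [pvGo]
  | cons x r ih =>
    intro sa
    cases sa with
    | true =>
      have := ih false
      by_cases hx : pvCC postags x <;> simp [pvGo, hx] <;> omega
    | false =>
      by_cases hx : pvCC postags x
      · have := ih false; simp [pvGo, hx]; omega
      · have := ih true; simp [pvGo, hx]; omega

-- and with an adjacent untagged pair it returns strictly more
theorem pvGo_len_gt (postags : List String) :
    ∀ (n : Nat) (L : List Int), L.length ≤ n → pvAdjBad postags L = true →
      (L.filter (fun x => pvCC postags x)).length < (pvGo postags L false).length := by
  intro n
  induction n with
  | zero =>
    intro L hlen h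
    have : L = [] := List.eq_nil_of_length_eq_zero (by omega)
    subst this; simp [pvAdjBad] at h
  | succ n ih =>
    intro L hlen h
    match L with
    | [] => simp [pvAdjBad] at h
    | [x] => simp [pvAdjBad] at h
    | x :: y :: t =>
      by_cases hx : pvCC postags x
      · have h2 : pvAdjBad postags (y :: t) = true := by
          simp only [pvAdjBad, Bool.or_eq_true_iff, Bool.and_eq_true_iff] at h
          rcases h with h1 | h1
          · simp [hx] at h1
          · simpa [pvAdjBad] using h1
        have hlen2 : (y :: t).length ≤ n := by simp at hlen ⊢; omega
        have := ih (y :: t) hlen2 h2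
        have hgo : pvGo postags (x :: y :: t) false = x :: pvGo postags (y :: t) false := by
          simp [pvGo, hx]
        rw [hgo, List.filter_cons_of_pos hx]
        have he : List.filter (pvCC postags) (y :: t)
            = List.filter (fun x => pvCC postags x) (y :: t) := rfl
        simp only [List.length_cons, he]
        omega
      · by_cases hy : pvCC postags y
        · have h2 : pvAdjBad postags (y :: t) = true := by
            simp only [pvAdjBad, Bool.or_eq_true_iff, Bool.and_eq_true_iff] at h
            rcases h with h1 | h1
            · simp [hy] at h1
            · simpa [pvAdjBad] using h1
          have ht : pvAdjBad postags t = true := by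
            cases t with
            | nil => simp [pvAdjBad] at h2
            | cons c u =>
              simp only [pvAdjBad, Bool.or_eq_true_iff, Bool.and_eq_true_iff] at h2 ⊢
              rcases h2 with h1 | h1
              · simp [hy] at h1
              · simpa [pvAdjBad] using h1
          have hlent : t.length ≤ n := by simp at hlen; omega
          have := ih t hlent ht
          simp [pvGo, hx, hy]; omega
        · have := pvGo_len_ge postags t false
          simp [pvGo, hx, hy]; omega

-- filtering by occurrence word then by tag, as one filter over enumerate
theorem pvFiltCC_eq (words postags : List String) (w : String) :
    (pvIdxsOf (PySem.List.enumerate words) w).filter (fun x => pvCC postags x)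
      = ((PySem.List.enumerate words).filter
          (fun p => p.2 == w && pvCC postags p.1)).map (fun p => p.1) := by
  unfold pvIdxsOf
  rw [List.filter_map, List.filter_filter]
  congr 1
  apply List.filter_congr
  intro a _
  simp [Function.comp, Bool.and_comm]

-- concatenating two disjoint filters is a permutation of the joint filter
theorem pv_filter_append_perm {α : Type} (p q : α → Bool)
    (hd : ∀ a, (p a && q a) = false) :
    ∀ l : List α, (l.filter p ++ l.filter q).Perm (l.filter (fun a => p a || q a)) := by
  intro l
  induction l with
  | nil => simp
  | cons a l ih =>
    by_cases hp : p a
    · have hq : q a = false := by have := hd a; simpa [hp] using this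
      simpa [hp, hq] using ih.cons a
    · by_cases hq : q a
      · have : (l.filter p ++ a :: l.filter q).Perm (a :: (l.filter p ++ l.filter q)) :=
          List.perm_middle
        simpa [hp, hq] using this.trans (ih.cons a)
      · simpa [hp, hq] using ih

theorem pv_alt_eq_joint (words postags : List String) :
    conjugation_finder_alt words postags
      = ((PySem.List.enumerate words).filter
          (fun p => (p.2 == "and" && pvCC postags p.1) || (p.2 == "or" && pvCC postags p.1))).map
          (fun p => p.1) := by
  unfold conjugation_finder_alt
  congr 1
  apply List.filter_congr
  intro p _
  cases h1 : (p.2 == "and") <;> cases h2 : (p.2 == "or") <;>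
    cases h3 : pvCC postags p.1 <;> simp

theorem pv_concat_perm_alt (words postags : List String) :
    ((pvIdxsOf (PySem.List.enumerate words) "and").filter (fun x => pvCC postags x)
      ++ (pvIdxsOf (PySem.List.enumerate words) "or").filter (fun x => pvCC postags x)).Perm
      (conjugation_finder_alt words postags) := by
  rw [pvFiltCC_eq, pvFiltCC_eq, ← List.map_append, pv_alt_eq_joint]
  refine List.Perm.map _
    (pv_filter_append_perm (fun p : Int × String => p.2 == "and" && pvCC postags p.1)
      (fun p : Int × String => p.2 == "or" && pvCC postags p.1) ?_ _)
  intro a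
  by_cases h1 : a.2 = "and"
  · simp [h1]
  · simp [h1]

theorem pv_alt_pairwise (words postags : List String) :
    (conjugation_finder_alt words postags).Pairwise (· < ·) := by
  unfold conjugation_finder_alt
  refine (List.pairwise_map).mpr ?_
  exact (pv_enumerate_fst_pairwise words).sublist List.filter_sublist

-- when no tag in range contains "CC", B is empty
theorem pv_alt_nil_of_no_cc (words postags : List String)
    (h : (PySem.List.pyRange 0 (words.length : Int) 1).any (fun i => pvCC postags i) = false) :
    conjugation_finder_alt words postags = [] := by
  unfold conjugation_finder_alt
  rw [List.map_eq_nil_iff, List.filter_eq_nil_iff]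
  intro p hp
  have hmem : p.1 ∈ PySem.List.pyRange 0 (words.length : Int) 1 := by
    have hmap : (PySem.List.enumerate words).map (fun q => q.1)
        = PySem.List.pyRange 0 (words.length : Int) 1 := by
      simpa using PySem.List.map_fst_enumerate words 0
    rw [← hmap]
    exact List.mem_map_of_mem hp
  have : pvCC postags p.1 = false := by
    by_contra hcc
    have : (PySem.List.pyRange 0 (words.length : Int) 1).any (fun i => pvCC postags i) = true :=
      List.any_eq_true.mpr ⟨p.1, hmem, by simpa using hcc⟩
    simp [this] at h
  simp [this]

-- A's two gate folds, simplified: with the gate true each count list is the full occurrence list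
theorem pv_count_eq (words postags : List String) (w : String)
    (hg : (PySem.List.pyRange 0 (words.length : Int) 1).any (fun i => pvCC postags i) = true) :
    (if (words.contains w && (PySem.List.pyRange 0 (words.length : Int) 1).any (fun i => pvCC postags i)) = true
      then pvIdxsOf (PySem.List.enumerate words) w else ([] : List Int))
      = pvIdxsOf (PySem.List.enumerate words) w := by
  by_cases h1 : w ∈ words
  · simp [h1, hg]
  · rw [pvIdxsOf_nil_of_not_mem words w h1]
    simp

-- A's value with the gate true and both count lists rewritten through the skip machine
theorem pv_A_eq_sorted_go (words postags : List String)
    (hg : (PySem.List.pyRange 0 (words.length : Int) 1).any (fun i => pvCC postags i) = true) :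
    conjugation_finder words postags
      = PySem.List.sorted
          (pvGo postags (pvIdxsOf (PySem.List.enumerate words) "and") false
            ++ pvGo postags (pvIdxsOf (PySem.List.enumerate words) "or") false)
          (fun x => x) false := by
  unfold conjugation_finder
  simp only [pv_foldl_gate _ (fun i => pvCC postags i)]
  rw [pv_count_eq words postags "and" hg, pv_count_eq words postags "or" hg]
  rw [pvFilterLoop_eq_go postags _ 0 (pvIdxsOf_pairwise words "and").nodup,
      pvFilterLoop_eq_go postags _ 0 (pvIdxsOf_pairwise words "or").nodup]
  simp

-- ===== VERDICT (by name: the statements are the Claim_ definitions above) =====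

theorem conjugation_finder_spec : Claim_unchanged_conjugation_finder := by
  intro words postags _ _
  unfold Spec_conjugation_finder
  intro hd
  unfold D_conjugation_finder at hd
  by_cases hg : (PySem.List.pyRange 0 (words.length : Int) 1).any (fun i => pvCC postags i) = true
  · have hg' : (List.range words.length).any (fun i => pvCC postags (i : Int)) = true := by
      rw [← pv_any_bridge]; exact hg
    have hadj : (pvAdjBad postags (pvConjOccs words "and" 0)
        || pvAdjBad postags (pvConjOccs words "or" 0)) = false := by
      cases hb : (pvAdjBad postags (pvConjOccs words "and" 0)
        || pvAdjBad postags (pvConjOccs words "or" 0))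
      · rfl
      · exact absurd (by rw [hg', hb]; rfl) hd
    have hA := Bool.or_eq_false_iff.mp hadj
    rw [pv_A_eq_sorted_go words postags hg]
    rw [pvGo_eq_filter postags _ _ (le_refl _) (by rw [pv_occs_bridge]; exact hA.1),
        pvGo_eq_filter postags _ _ (le_refl _) (by rw [pv_occs_bridge]; exact hA.2)]
    exact PySem.List.sorted_eq_of_perm_of_pairwise_lt _ _ _
      (pv_concat_perm_alt words postags).symm (pv_alt_pairwise words postags)
  · have hgf : (PySem.List.pyRange 0 (words.length : Int) 1).any (fun i => pvCC postags i) = false := by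
      simpa using hg
    unfold conjugation_finder
    simp only [pv_foldl_gate _ (fun i => pvCC postags i)]
    rw [pv_alt_nil_of_no_cc words postags hgf]
    simp [hgf, pvFilterLoop_nil]
    rfl

theorem conjugation_finder_changed : Claim_changed_conjugation_finder := by
  unfold Claim_changed_conjugation_finder
  refine ⟨by decide, by decide, by decide, ?_, by decide, by decide⟩
  show conjugation_finder ["and", "and", "ran"] ["DT", "DT", "CC"] = [1]
  rw [pv_A_eq_sorted_go _ _ (by decide)]
  decide

theorem conjugation_finder_tight : Claim_exact_conjugation_finder := by
  intro words postags _ _ hd heq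
  unfold D_conjugation_finder at hd
  rw [Bool.and_eq_true] at hd
  obtain ⟨hg', hbad⟩ := hd
  have hg : (PySem.List.pyRange 0 (words.length : Int) 1).any (fun i => pvCC postags i) = true := by
    rw [pv_any_bridge]; exact hg'
  rw [← pv_occs_bridge, ← pv_occs_bridge] at hbad
  have hlenA : (conjugation_finder words postags).length
      = (pvGo postags (pvIdxsOf (PySem.List.enumerate words) "and") false).length
        + (pvGo postags (pvIdxsOf (PySem.List.enumerate words) "or") false).length := by
    rw [pv_A_eq_sorted_go words postags hg]
    rw [(PySem.List.sorted_perm _ _ _).length_eq, List.length_append]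
  have hlenB : (conjugation_finder_alt words postags).length
      = ((pvIdxsOf (PySem.List.enumerate words) "and").filter (fun x => pvCC postags x)).length
        + ((pvIdxsOf (PySem.List.enumerate words) "or").filter (fun x => pvCC postags x)).length := by
    rw [← (pv_concat_perm_alt words postags).length_eq, List.length_append]
  have hge1 := pvGo_len_ge postags (pvIdxsOf (PySem.List.enumerate words) "and") false
  have hge2 := pvGo_len_ge postags (pvIdxsOf (PySem.List.enumerate words) "or") false
  have hlt : (conjugation_finder_alt words postags).length
      < (conjugation_finder words postags).length := by
    rcases Bool.or_eq_true_iff.mp hbad with hb | hb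
    · have := pvGo_len_gt postags _ (pvIdxsOf (PySem.List.enumerate words) "and") (le_refl _) hb
      omega
    · have := pvGo_len_gt postags _ (pvIdxsOf (PySem.List.enumerate words) "or") (le_refl _) hb
      omega
  rw [heq] at hlt
  omega
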